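-- pv_equiv track=rewrite | github.com/KyraLengfeld/zephyr_fork | z_host_external_arch_docs/out_functions.py | group_function_calls_by_keyword
-- ===== SOURCE A (Python) =====
-- from typing import List, Dict, Tuple
--
-- def group_function_calls_by_keyword(function_calls: Dict[str, Dict[str, Dict[str, List[str]]]], groups: List[str]) -> Dict[str, List[str]]:
--     """
--     Groups functions by user-defined keywords. A function belongs to a group if its name contains the group's keyword.
--
--     :param function_calls: Dictionary mapping file paths to their function call data.
--     :param groups: List of group keywords provided by the user.
--     :return: Dictionary mapping each group to a list of matched function names.
--     """
--     grouped_calls = {group: [] for group in groups}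
--
--     # Iterate through each file's call data
--     for file_data in function_calls.values():
--         if "function_calls" in file_data:
--             for func_name in file_data["function_calls"]:
--                 # Add function to matching group(s) if the group keyword is part of the function name
--                 for group in groups:
--                     if group in func_name and func_name not in grouped_calls[group]:
--                         grouped_calls[group].append(func_name)
--
--     return grouped_calls
-- ===== SOURCE B (Python) =====
-- def group_function_calls_by_keyword(function_calls, groups):
--     # One flat pass collecting every function name, global ordered dedup, then per-group filter.
--     names = [name
--              for file_data in function_calls.values()
--              if "function_calls" in file_data
--              for name in file_data["function_calls"]]
--     unique_names = list(dict.fromkeys(names))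
--     return {group: [name for name in unique_names if group in name]
--             for group in groups}
-- ===== Notes on version B (the rewrite author's own statement) =====
-- stated objective: simpler
-- what changed: Replaces the fused triple loop with per-group membership dedup by a flat name collection, one global ordered dedup (dict.fromkeys), and a per-group filter comprehension.
import Mathlib
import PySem

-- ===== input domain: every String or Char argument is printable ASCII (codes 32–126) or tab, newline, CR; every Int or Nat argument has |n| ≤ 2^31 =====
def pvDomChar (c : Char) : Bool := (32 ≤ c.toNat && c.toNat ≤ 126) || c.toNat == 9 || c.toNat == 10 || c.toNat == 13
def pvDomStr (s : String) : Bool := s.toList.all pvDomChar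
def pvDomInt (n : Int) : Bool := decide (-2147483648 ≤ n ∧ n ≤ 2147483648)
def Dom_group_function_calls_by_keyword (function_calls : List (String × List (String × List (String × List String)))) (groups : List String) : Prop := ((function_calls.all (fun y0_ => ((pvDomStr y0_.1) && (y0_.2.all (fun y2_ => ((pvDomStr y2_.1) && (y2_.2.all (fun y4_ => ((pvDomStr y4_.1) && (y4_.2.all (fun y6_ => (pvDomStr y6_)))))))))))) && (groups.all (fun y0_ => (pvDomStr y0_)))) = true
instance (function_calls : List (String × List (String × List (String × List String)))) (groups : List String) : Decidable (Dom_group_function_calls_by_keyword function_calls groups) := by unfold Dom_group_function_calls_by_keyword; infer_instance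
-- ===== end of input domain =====

-- ===== PORT A =====
-- B changes the decomposition only (flat collect + global dedup + per-group filter); return values proved equal.
-- Python 'group in func_name' is PySem.Str.isIn; dicts follow the association-list convention (lookup = first match).

-- step of A's innermost loop: 'if group in func_name and func_name not in grouped_calls[group]: append'
def pvStepA (fn : String) (d : PySem.Dict String (List String)) (grp : String) : PySem.Dict String (List String) :=
  if PySem.Str.isIn grp fn && !((d.getD grp []).contains fn) then
    d.insert grp (d.getD grp [] ++ [fn])
  else d

def group_function_calls_by_keyword (function_calls : List (String × List (String × List (String × List String)))) (groups : List String) : List (String × List String) :=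
  -- grouped_calls = {group: [] for group in groups}
  let grouped0 : PySem.Dict String (List String) :=
    groups.foldl (fun d g => d.insert g []) PySem.Dict.empty
  -- for file_data in function_calls.values(): if "function_calls" in file_data: for func_name in file_data["function_calls"]: for group in groups: …
  let grouped :=
    function_calls.foldl (fun d fd =>
      match fd.2.find? (fun p => p.1 == "function_calls") with
      | some p => (p.2.map (·.1)).foldl (fun d fn => groups.foldl (pvStepA fn) d) d
      | none => d) grouped0
  grouped.items

-- ===== PORT B =====
def group_function_calls_by_keyword_alt (function_calls : List (String × List (String × List (String × List String)))) (groups : List String) : List (String × List String) :=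
  -- names = [name for file_data in … if "function_calls" in file_data for name in file_data["function_calls"]]
  let names : List String :=
    function_calls.flatMap (fun fd =>
      (fd.2.find? (fun p => p.1 == "function_calls")).elim [] (fun p => p.2.map (·.1)))
  -- unique_names = list(dict.fromkeys(names))
  let uniqueNames := PySem.List.dedup names
  -- {group: [name for name in unique_names if group in name] for group in groups}
  (groups.foldl (fun d g =>
      d.insert g (uniqueNames.filter (fun n => PySem.Str.isIn g n))) PySem.Dict.empty).items

-- ===== PRECONDITION & SPEC =====
def Spec_group_function_calls_by_keyword (function_calls : List (String × List (String × List (String × List String)))) (groups : List String) (out : List (String × List String)) : Prop := out = group_function_calls_by_keyword_alt function_calls groups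
instance (function_calls : List (String × List (String × List (String × List String)))) (groups : List String) (out : List (String × List String)) : Decidable (Spec_group_function_calls_by_keyword function_calls groups out) := by unfold Spec_group_function_calls_by_keyword; infer_instance

-- ===== CLAIM (what is proved, stated in full; the proofs are below) =====
def Claim_equal_group_function_calls_by_keyword : Prop := ∀ (function_calls : List (String × List (String × List (String × List String)))) (groups : List String), Dom_group_function_calls_by_keyword function_calls groups → Spec_group_function_calls_by_keyword function_calls groups (group_function_calls_by_keyword function_calls groups)

-- ===== LEMMAS AND PROOFS =====

-- getD after a fold of inserts whose value depends only on the key (B's dict build and A's initialisation)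
theorem pv_getD_foldl_insert (v : String → List String) :
    ∀ (gs : List String) (d : PySem.Dict String (List String)) (g : String),
      (gs.foldl (fun d x => d.insert x (v x)) d).getD g [] =
        if g ∈ gs then v g else d.getD g [] := by
  intro gs
  induction gs with
  | nil => simp
  | cons x xs ih =>
    intro d g
    simp only [List.foldl_cons, ih, PySem.Dict.getD_insert, List.mem_cons]
    by_cases h1 : g ∈ xs <;> by_cases h2 : g = x <;> simp [h1, h2]

-- getD after one pvStepA
theorem pv_getD_stepA (fn : String) (d : PySem.Dict String (List String)) (grp g : String) :
    (pvStepA fn d grp).getD g [] =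
      if g = grp ∧ PySem.Str.isIn g fn = true then PySem.Set.add (d.getD g []) fn
      else d.getD g [] := by
  unfold pvStepA
  by_cases hg : g = grp
  · subst hg
    generalize PySem.Str.isIn g fn = b
    cases b with
    | false => simp
    | true =>
      by_cases hmem : fn ∈ d.getD g []
      · simp [hmem]
      · simp [hmem, PySem.Dict.getD_insert_self]
  · by_cases hc : (PySem.Str.isIn grp fn && !((d.getD grp []).contains fn)) = true
    · rw [if_pos hc, PySem.Dict.getD_insert]; simp [hg]
    · rw [if_neg hc]; simp [hg]

-- getD after A's inner loop over groups (one func_name)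
theorem pv_getD_inner (fn : String) :
    ∀ (gs : List String) (d : PySem.Dict String (List String)) (g : String),
      (gs.foldl (pvStepA fn) d).getD g [] =
        if g ∈ gs ∧ PySem.Str.isIn g fn = true then PySem.Set.add (d.getD g []) fn
        else d.getD g [] := by
  intro gs
  induction gs with
  | nil => simp
  | cons x xs ih =>
    intro d g
    simp only [List.foldl_cons, ih, pv_getD_stepA, List.mem_cons]
    generalize PySem.Str.isIn g fn = b
    cases b with
    | false => simp
    | true =>
      by_cases h2 : g = x <;> by_cases h1 : g ∈ xs <;>
        simp [h1, h2]

-- getD after A's loop over a stream of func_names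
theorem pv_getD_outer (groups : List String) :
    ∀ (l : List String) (d : PySem.Dict String (List String)) (g : String),
      (l.foldl (fun d fn => groups.foldl (pvStepA fn) d) d).getD g [] =
        if g ∈ groups then
          PySem.Set.update (d.getD g []) (l.filter (fun fn => PySem.Str.isIn g fn))
        else d.getD g [] := by
  intro l
  induction l with
  | nil => intro d g; by_cases h : g ∈ groups <;> simp [h, PySem.Set.update_nil]
  | cons fn l ih =>
    intro d g
    simp only [List.foldl_cons, ih, pv_getD_inner, List.filter_cons]
    by_cases h1 : g ∈ groups <;>
      by_cases h2 : PySem.Chars.isIn g.toList fn.toList = true <;>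
      simp [h1, h2, PySem.Set.update_cons]

-- ordered dedup commutes with filter
theorem pv_ofList_filter (p : String → Bool) (l : List String) :
    PySem.Set.ofList (l.filter p) = (PySem.Set.ofList l).filter p := by
  induction l using List.reverseRecOn with
  | nil => simp [PySem.Set.ofList_nil]
  | append_singleton xs x ih =>
    rw [List.filter_append, PySem.Set.ofList_append_singleton]
    by_cases hp : p x = true
    · rw [List.filter_cons, List.filter_nil]
      simp only [hp, if_pos, PySem.Set.ofList_append_singleton, ih]
      by_cases hm : x ∈ PySem.Set.ofList xs
      · rw [PySem.Set.add_of_mem hm, PySem.Set.add_of_mem (by simp [List.mem_filter, hm, hp])]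
      · rw [PySem.Set.add_of_not_mem hm,
            PySem.Set.add_of_not_mem (by simp [List.mem_filter, hm]),
            List.filter_append, List.filter_cons, List.filter_nil]
        simp [hp]
    · rw [List.filter_cons, List.filter_nil]
      simp only [hp]
      rw [PySem.Set.add_eq_ite]
      by_cases hm : x ∈ PySem.Set.ofList xs
      · simp [hm, ih]
      · simp [hm, List.filter_append, hp, ih]

-- pvStepA preserves the key list when the touched key is already present
theorem pv_keys_stepA (fn : String) (d : PySem.Dict String (List String)) (grp : String)
    (h : d.contains grp = true) : (pvStepA fn d grp).keys = d.keys := by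
  unfold pvStepA
  split_ifs with hc
  · exact PySem.Dict.keys_insert_of_contains _ _ h
  · rfl

theorem pv_keys_inner (fn : String) :
    ∀ (gs : List String) (d : PySem.Dict String (List String)),
      (∀ x ∈ gs, d.contains x = true) → (gs.foldl (pvStepA fn) d).keys = d.keys := by
  intro gs
  induction gs with
  | nil => intro d _; rfl
  | cons x xs ih =>
    intro d h
    have hx : d.contains x = true := h x (by simp)
    have hk := pv_keys_stepA fn d x hx
    simp only [List.foldl_cons]
    rw [ih (pvStepA fn d x) (fun y hy => by
      rw [PySem.Dict.contains_iff_mem_keys, hk, ← PySem.Dict.contains_iff_mem_keys]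
      exact h y (by simp [hy])), hk]

theorem pv_keys_outer (groups : List String) :
    ∀ (l : List String) (d : PySem.Dict String (List String)),
      (∀ x ∈ groups, d.contains x = true) →
      (l.foldl (fun d fn => groups.foldl (pvStepA fn) d) d).keys = d.keys := by
  intro l
  induction l with
  | nil => intro d _; rfl
  | cons fn l ih =>
    intro d h
    have hk := pv_keys_inner fn groups d h
    simp only [List.foldl_cons]
    rw [ih _ (fun y hy => by
      rw [PySem.Dict.contains_iff_mem_keys, hk, ← PySem.Dict.contains_iff_mem_keys]
      exact h y hy), hk]

-- the big A fold equals a single fold over the flattened name stream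
theorem pv_fold_flatten (groups : List String)
    (function_calls : List (String × List (String × List (String × List String)))) :
    ∀ (d : PySem.Dict String (List String)),
      function_calls.foldl (fun d fd =>
        match fd.2.find? (fun p => p.1 == "function_calls") with
        | some p => (p.2.map (·.1)).foldl (fun d fn => groups.foldl (pvStepA fn) d) d
        | none => d) d =
      (function_calls.flatMap (fun fd =>
        (fd.2.find? (fun p => p.1 == "function_calls")).elim [] (fun p => p.2.map (·.1)))).foldl
        (fun d fn => groups.foldl (pvStepA fn) d) d := by
  induction function_calls with
  | nil => intro d; rfl
  | cons fd rest ih =>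
    intro d
    simp only [List.foldl_cons, List.flatMap_cons, List.foldl_append]
    cases h : fd.2.find? (fun p => p.1 == "function_calls") with
    | none => simp [ih]
    | some p => simp [ih]

-- keys of the initial dict / B's dict
theorem pv_keys_init (v : String → List String) (groups : List String) :
    (groups.foldl (fun d g => d.insert g (v g)) PySem.Dict.empty).keys =
      PySem.Set.ofList groups := by
  rw [PySem.Dict.keys_foldl_insert groups (fun _ g => v g) PySem.Dict.empty]
  simp [PySem.Set.update_nil_left, PySem.Dict.keys_empty]

-- ===== VERDICT (by name: the statement is the Claim_ definition above) =====
theorem group_function_calls_by_keyword_spec : Claim_equal_group_function_calls_by_keyword := by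
  intro function_calls groups _
  unfold Spec_group_function_calls_by_keyword
  unfold group_function_calls_by_keyword group_function_calls_by_keyword_alt
  simp only []
  set names : List String :=
    function_calls.flatMap (fun fd =>
      (fd.2.find? (fun p => p.1 == "function_calls")).elim [] (fun p => p.2.map (·.1))) with hnames
  set g0 : PySem.Dict String (List String) :=
    groups.foldl (fun d g => d.insert g []) PySem.Dict.empty with hg0
  set dB : PySem.Dict String (List String) :=
    groups.foldl (fun d g =>
      d.insert g ((PySem.List.dedup names).filter (fun n => PySem.Str.isIn g n)))
      PySem.Dict.empty with hdB
  have hkeys0 : g0.keys = PySem.Set.ofList groups := pv_keys_init (fun _ => []) groups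
  have hkeysB : dB.keys = PySem.Set.ofList groups :=
    pv_keys_init (fun g => (PySem.List.dedup names).filter (fun n => PySem.Str.isIn g n)) groups
  have hc0 : ∀ x ∈ groups, g0.contains x = true := by
    intro x hx
    rw [PySem.Dict.contains_iff_mem_keys, hkeys0, PySem.Set.mem_ofList]
    exact hx
  set dA := function_calls.foldl (fun d fd =>
      match fd.2.find? (fun p => p.1 == "function_calls") with
      | some p => (p.2.map (·.1)).foldl (fun d fn => groups.foldl (pvStepA fn) d) d
      | none => d) g0 with hdA
  have hflat : dA = names.foldl (fun d fn => groups.foldl (pvStepA fn) d) g0 :=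
    pv_fold_flatten groups function_calls g0
  have hkeysA : dA.keys = PySem.Set.ofList groups := by
    rw [hflat, pv_keys_outer groups names g0 hc0, hkeys0]
  have hndA : dA.keys.Nodup := by rw [hkeysA]; exact PySem.Set.nodup_ofList groups
  have hndB : dB.keys.Nodup := by rw [hkeysB]; exact PySem.Set.nodup_ofList groups
  rw [PySem.Dict.items_eq_map_keys dA hndA [], PySem.Dict.items_eq_map_keys dB hndB [],
    hkeysA, hkeysB]
  apply List.map_congr_left
  intro g hg
  have hgg : g ∈ groups := (PySem.Set.mem_ofList groups g).mp hg
  have hA : dA.getD g [] =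
      PySem.Set.ofList (names.filter (fun fn => PySem.Str.isIn g fn)) := by
    rw [hflat, pv_getD_outer groups names g0 g]
    simp only [hgg, if_pos]
    rw [pv_getD_foldl_insert (fun _ => []) groups PySem.Dict.empty g]
    simp [hgg, PySem.Set.update_nil_left]
  have hB : dB.getD g [] =
      (PySem.List.dedup names).filter (fun n => PySem.Str.isIn g n) := by
    rw [hdB, pv_getD_foldl_insert
      (fun g => (PySem.List.dedup names).filter (fun n => PySem.Str.isIn g n)) groups
      PySem.Dict.empty g]
    simp [hgg]
  rw [hA, hB]
  simp only [PySem.List.dedup_eq_ofList]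
  rw [pv_ofList_filter]
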